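-- pv_equiv track=rewrite | github.com/zyzshishui/sglang | python/sglang/srt/multimodal/processors/voxtral.py | _find_audio_offsets
-- ===== SOURCE A (Python) =====
-- from typing import Dict, List, Optional
--
-- def _find_audio_offsets(input_ids: List[int], audio_token_id: int) -> List[tuple]:
--     """Find consecutive runs of audio_token_id in input_ids."""
--     offsets = []
--     start = None
--     for i, tok_id in enumerate(input_ids):
--         if tok_id == audio_token_id:
--             if start is None:
--                 start = i
--         elif start is not None:
--             offsets.append((start, i - 1))
--             start = None
--     if start is not None:
--         offsets.append((start, len(input_ids) - 1))
--     return offsets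
-- ===== SOURCE B (Python) =====
-- from itertools import groupby
--
-- def _find_audio_offsets(input_ids, audio_token_id):
--     """Find consecutive runs of audio_token_id in input_ids."""
--     offsets = []
--     pos = 0
--     for key, group in groupby(input_ids):
--         run_len = sum(1 for _ in group)
--         if key == audio_token_id:
--             offsets.append((pos, pos + run_len - 1))
--         pos += run_len
--     return offsets
-- ===== Notes on version B (the rewrite author's own statement) =====
-- stated objective: idiomatic
-- what changed: Replaces the start/None state machine and its post-loop flush with itertools.groupby: each run of equal tokens is consumed as one group while a running position index is advanced by the group length.
import Mathlib
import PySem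

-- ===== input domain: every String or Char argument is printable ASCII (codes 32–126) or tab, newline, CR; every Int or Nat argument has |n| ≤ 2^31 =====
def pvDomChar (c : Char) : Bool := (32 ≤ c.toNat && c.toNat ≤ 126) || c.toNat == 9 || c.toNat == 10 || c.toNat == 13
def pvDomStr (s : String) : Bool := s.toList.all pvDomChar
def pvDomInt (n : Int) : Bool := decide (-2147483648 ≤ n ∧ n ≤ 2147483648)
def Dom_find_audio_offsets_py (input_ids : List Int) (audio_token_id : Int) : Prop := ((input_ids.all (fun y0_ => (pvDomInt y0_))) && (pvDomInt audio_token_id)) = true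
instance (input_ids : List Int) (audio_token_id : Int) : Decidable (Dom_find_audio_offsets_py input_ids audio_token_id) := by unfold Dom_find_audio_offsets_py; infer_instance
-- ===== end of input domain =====

-- B replaces A's start/None state machine (with its post-loop flush) by a groupby-style
-- run decomposition advancing a position index; same O(n) cost, more idiomatic.

-- ===== PORT A =====
-- A's for-loop over enumerate(input_ids), state (i, start, offsets), as structural recursion.
def findAudioGoA (tid : Int) : List Int → Int → Option Int → List (Int × Int) → List (Int × Int)
  | [], i, start, offsets =>
      match start with
      | some s => offsets ++ [(s, i - 1)]   -- post-loop flush: i = len(input_ids) here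
      | none => offsets
  | tok :: rest, i, start, offsets =>
      if tok == tid then
        match start with
        | none => findAudioGoA tid rest (i + 1) (some i) offsets
        | some _ => findAudioGoA tid rest (i + 1) start offsets
      else
        match start with
        | some s => findAudioGoA tid rest (i + 1) none (offsets ++ [(s, i - 1)])
        | none => findAudioGoA tid rest (i + 1) none offsets

def find_audio_offsets_py (input_ids : List Int) (audio_token_id : Int) : List (Int × Int) :=
  findAudioGoA audio_token_id input_ids 0 none []

-- ===== PORT B =====
-- B's groupby loop: consume one maximal run of equal tokens per step, advance pos by its length.
def findAudioGoB (tid : Int) : List Int → Int → List (Int × Int)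
  | [], _ => []
  | x :: xs, pos =>
      let runLen : Int := 1 + (xs.takeWhile (· == x)).length
      (if x == tid then [(pos, pos + runLen - 1)] else []) ++
        findAudioGoB tid (xs.dropWhile (· == x)) (pos + runLen)
  termination_by xs _ => xs.length
  decreasing_by exact Nat.lt_succ_of_le (List.length_dropWhile_le _ _)

def find_audio_offsets_py_alt (input_ids : List Int) (audio_token_id : Int) : List (Int × Int) :=
  findAudioGoB audio_token_id input_ids 0

-- ===== PRECONDITION & SPEC =====
def Spec_find_audio_offsets_py (input_ids : List Int) (audio_token_id : Int) (out : List (Int × Int)) : Prop := out = find_audio_offsets_py_alt input_ids audio_token_id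
instance (input_ids : List Int) (audio_token_id : Int) (out : List (Int × Int)) : Decidable (Spec_find_audio_offsets_py input_ids audio_token_id out) := by unfold Spec_find_audio_offsets_py; infer_instance

-- ===== CLAIM (what is proved, stated in full; the proofs are below) =====
def Claim_equal_find_audio_offsets_py : Prop := ∀ (input_ids : List Int) (audio_token_id : Int), Dom_find_audio_offsets_py input_ids audio_token_id → Spec_find_audio_offsets_py input_ids audio_token_id (find_audio_offsets_py input_ids audio_token_id)

-- ===== LEMMAS AND PROOFS =====

-- unfolding equations for the well-founded recursion of B's port
theorem findAudioGoB_nil (tid i : Int) : findAudioGoB tid [] i = [] := by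
  conv_lhs => unfold findAudioGoB

theorem findAudioGoB_cons (tid x : Int) (xs : List Int) (pos : Int) :
    findAudioGoB tid (x :: xs) pos =
      (if x == tid then [(pos, pos + (1 + ((xs.takeWhile (· == x)).length : Int)) - 1)] else []) ++
        findAudioGoB tid (xs.dropWhile (· == x)) (pos + (1 + ((xs.takeWhile (· == x)).length : Int))) := by
  conv_lhs => unfold findAudioGoB

-- A run of tokens ≠ tid is walked through by A's loop without any state change.
theorem findAudioGoA_skip (tid : Int) (p : List Int) (hp : ∀ y ∈ p, y ≠ tid) :
    ∀ (r : List Int) (i : Int) (offsets : List (Int × Int)),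
      findAudioGoA tid (p ++ r) i none offsets =
        findAudioGoA tid r (i + p.length) none offsets := by
  induction p with
  | nil => intro r i offsets; simp
  | cons y p ih =>
      intro r i offsets
      have hy : (y == tid) = false := by
        simpa using hp y (List.mem_cons_self)
      simp only [List.cons_append, findAudioGoA, hy, Bool.false_eq_true, if_false]
      rw [ih (fun z hz => hp z (List.mem_cons_of_mem _ hz))]
      congr 1
      simp only [List.length_cons]
      push_cast
      ring

-- Core: A's loop from state `none` produces exactly B's remaining output, and from
-- state `some s` (mid-run of tid's) it closes that run as B would.
theorem findAudio_main (tid : Int) :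
    ∀ n (l : List Int), l.length ≤ n →
      (∀ (i : Int) (offsets : List (Int × Int)),
          findAudioGoA tid l i none offsets = offsets ++ findAudioGoB tid l i) ∧
      (∀ (i s : Int) (offsets : List (Int × Int)),
          findAudioGoA tid l i (some s) offsets =
            offsets ++ (s, i + ((l.takeWhile (· == tid)).length : Int) - 1) ::
              findAudioGoB tid (l.dropWhile (· == tid)) (i + (l.takeWhile (· == tid)).length)) := by
  intro n
  induction n with
  | zero =>
      intro l hl
      have : l = [] := List.eq_nil_of_length_eq_zero (Nat.le_zero.mp hl)
      subst this
      constructor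
      · intro i offsets; simp [findAudioGoA, findAudioGoB_nil]
      · intro i s offsets; simp [findAudioGoA, findAudioGoB_nil]
  | succ n ih =>
      intro l hl
      cases l with
      | nil =>
          constructor
          · intro i offsets; simp [findAudioGoA, findAudioGoB_nil]
          · intro i s offsets; simp [findAudioGoA, findAudioGoB_nil]
      | cons x xs =>
          have hxs : xs.length ≤ n := Nat.lt_succ_iff.mp (by simpa using hl)
          have step : ∀ (hx : x ≠ tid) (i : Int) (offsets : List (Int × Int)),
              findAudioGoA tid xs (i + 1) none offsets =
                offsets ++ findAudioGoB tid (x :: xs) i := by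
            intro hx i offsets
            have hxb : (x == tid) = false := by simpa using hx
            have hsplit : xs = xs.takeWhile (· == x) ++ xs.dropWhile (· == x) :=
              (List.takeWhile_append_dropWhile).symm
            have hall : ∀ y ∈ xs.takeWhile (· == x), y ≠ tid := by
              intro y hy
              have h2 := List.mem_takeWhile_imp hy
              simp at h2; subst h2; exact hx
            rw [show findAudioGoA tid xs (i+1) none offsets
                  = findAudioGoA tid (xs.takeWhile (· == x) ++ xs.dropWhile (· == x)) (i+1) none offsets
                by rw [← hsplit]]
            rw [findAudioGoA_skip tid _ hall]
            have hdrop : (xs.dropWhile (· == x)).length ≤ n :=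
              le_trans (List.length_dropWhile_le _ _) hxs
            rw [((ih _ hdrop).1)]
            rw [findAudioGoB_cons, hxb]
            simp only [Bool.false_eq_true, if_false, List.nil_append]
            congr 2
            push_cast; ring
          constructor
          · intro i offsets
            by_cases hx : x = tid
            · subst hx
              simp only [findAudioGoA, beq_self_eq_true, if_true]
              rw [((ih xs hxs).2) (i + 1) i offsets]
              rw [findAudioGoB_cons, beq_self_eq_true]
              simp only [if_true]
              congr 2
              · congr 1 <;> ring
              · congr 1; ring
            · have hxb : (x == tid) = false := by simpa using hx
              simp only [findAudioGoA, hxb, Bool.false_eq_true, if_false]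
              exact step hx i offsets
          · intro i s offsets
            by_cases hx : x = tid
            · subst hx
              simp only [findAudioGoA, beq_self_eq_true, if_true]
              rw [((ih xs hxs).2) (i + 1) s offsets]
              simp only [List.takeWhile_cons, beq_self_eq_true, if_true,
                List.dropWhile_cons, List.length_cons]
              congr 2
              · congr 1; push_cast; ring
              · congr 1; push_cast; ring
            · have hxb : (x == tid) = false := by simpa using hx
              simp only [findAudioGoA, hxb, Bool.false_eq_true, if_false]
              rw [step hx i (offsets ++ [(s, i - 1)])]
              have ht : (x :: xs).takeWhile (· == tid) = [] := by
                simp [hxb]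
              have hd : (x :: xs).dropWhile (· == tid) = x :: xs := by
                simp [hxb]
              rw [ht, hd]
              simp

-- ===== VERDICT (by name: the statement is the Claim_ definition above) =====
theorem find_audio_offsets_py_spec : Claim_equal_find_audio_offsets_py := by
  intro input_ids audio_token_id _
  unfold Spec_find_audio_offsets_py find_audio_offsets_py find_audio_offsets_py_alt
  simpa using ((findAudio_main audio_token_id input_ids.length input_ids le_rfl).1 0 [])
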